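-- pv_equiv track=rewrite | github.com/betiiy-haile/DSA-Practices | 2456-construct-smallest-number-from-di-string/2456-construct-smallest-number-from-di-string.py | smallestNumber
-- ===== SOURCE A (Python) =====
-- def smallestNumber(pattern: str) -> str:
--     n = len(pattern)
--     stack = []
--     result = ""
--
--     for i in range(1, n + 2):
--         stack.append(str(i))
--         if i == n + 1 or pattern[i - 1] == 'I':
--             while stack:
--                 result += stack.pop()
--
--     return result
-- ===== SOURCE B (Python) =====
-- def smallestNumber(pattern: str) -> str:
--     # Emit each maximal run of non-'I' characters as one descending block of digits,
--     # instead of pushing onto a stack and flushing.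
--     n = len(pattern)
--     out = []
--     i = 0
--     start = 1
--     while i <= n:
--         j = i
--         while j < n and pattern[j] != 'I':
--             j += 1
--         for d in range(start + (j - i), start - 1, -1):
--             out.append(str(d))
--         start += j - i + 1
--         i = j + 1
--     return ''.join(out)
-- ===== Notes on version B (the rewrite author's own statement) =====
-- stated objective: alternative
-- what changed: Replaces A's push-every-digit-then-flush stack loop by directly emitting, for each maximal run of non-'I' pattern characters, the corresponding descending block of digits via a step=-1 range.
import Mathlib
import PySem

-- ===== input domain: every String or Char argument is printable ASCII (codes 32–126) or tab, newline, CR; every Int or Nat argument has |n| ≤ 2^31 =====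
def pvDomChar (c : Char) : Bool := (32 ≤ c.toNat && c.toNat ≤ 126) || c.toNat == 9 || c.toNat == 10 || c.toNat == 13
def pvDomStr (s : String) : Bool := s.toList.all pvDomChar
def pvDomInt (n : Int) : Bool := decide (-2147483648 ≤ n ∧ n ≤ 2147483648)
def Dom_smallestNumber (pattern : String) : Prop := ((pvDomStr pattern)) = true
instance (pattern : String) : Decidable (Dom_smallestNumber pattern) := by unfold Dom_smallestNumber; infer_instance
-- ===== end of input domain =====

-- B replaces A's push-then-flush stack with direct emission of each maximal
-- non-'I' run as one descending block of digits (objective: alternative decomposition).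

-- ===== PORT A =====
-- loop body of A's `for i in range(1, n + 2)`: append str(i); on `i == n+1 or pattern[i-1] == 'I'`
-- pop the whole stack onto result
def pvStepA (cs : List Char) (s : List (List Char) × List Char) (i : Int) :
    List (List Char) × List Char :=
  let stack := s.1 ++ [PySem.Int.toChars i]
  if i = (cs.length : Int) + 1 ∨ PySem.List.pyGet? cs (i - 1) = some 'I' then
    ([], s.2 ++ stack.reverse.flatten)
  else
    (stack, s.2)

def smallestNumber (pattern : String) : String :=
  let cs := pattern.toList
  let n : Int := cs.length
  String.mk ((PySem.List.pyRange 1 (n + 2) 1).foldl (pvStepA cs) ([], [])).2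

-- ===== PORT B =====
-- B's outer `while i <= n` loop: find the end j of the maximal run of non-'I' chars,
-- emit str(start + (j-i)) … str(start) (range with step -1), continue after the run.
def pvAltGo (cs : List Char) (start : Int) : List Char :=
  let L := (cs.takeWhile (fun c => c ≠ 'I')).length
  let run := ((PySem.List.pyRange (start + L) (start - 1) (-1)).map PySem.Int.toChars).flatten
  if L = cs.length then run
  else run ++ pvAltGo (cs.drop (L + 1)) (start + L + 1)
termination_by cs.length
decreasing_by
  have hle : (List.takeWhile (fun c => decide (c ≠ 'I')) cs).length ≤ cs.length :=
    (List.takeWhile_sublist _).length_le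
  simp only [List.length_drop]
  omega

def smallestNumber_alt (pattern : String) : String :=
  String.mk (pvAltGo pattern.toList 1)

-- ===== PRECONDITION & SPEC =====
def Spec_smallestNumber (pattern : String) (out : String) : Prop := out = smallestNumber_alt pattern
instance (pattern : String) (out : String) : Decidable (Spec_smallestNumber pattern out) := by unfold Spec_smallestNumber; infer_instance

-- ===== CLAIM (what is proved, stated in full; the proofs are below) =====
def Claim_equal_smallestNumber : Prop := ∀ (pattern : String), Dom_smallestNumber pattern → Spec_smallestNumber pattern (smallestNumber pattern)

-- ===== LEMMAS AND PROOFS =====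

-- one-step unfoldings of pvAltGo
theorem pvAltGo_final (cs : List Char) (start : Int)
    (h : (cs.takeWhile (fun c => c ≠ 'I')).length = cs.length) :
    pvAltGo cs start
      = ((PySem.List.pyRange (start + (cs.takeWhile (fun c => c ≠ 'I')).length) (start - 1)
          (-1)).map PySem.Int.toChars).flatten := by
  rw [pvAltGo, if_pos h]

theorem pvAltGo_step (cs : List Char) (start : Int)
    (h : ¬ (cs.takeWhile (fun c => c ≠ 'I')).length = cs.length) :
    pvAltGo cs start
      = ((PySem.List.pyRange (start + (cs.takeWhile (fun c => c ≠ 'I')).length) (start - 1)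
          (-1)).map PySem.Int.toChars).flatten
        ++ pvAltGo (cs.drop ((cs.takeWhile (fun c => c ≠ 'I')).length + 1))
            (start + (cs.takeWhile (fun c => c ≠ 'I')).length + 1) := by
  rw [pvAltGo]
  simp only [if_neg h]

-- the reversed ascending digit-block of A's stack is B's step-(-1) range
theorem pvRevRange (p L : Nat) :
    ((List.range (L + 1)).map (fun k : Nat => PySem.Int.toChars ((p : Int) + 1 + k))).reverse
      = (PySem.List.pyRange ((p : Int) + 1 + L) (p : Int) (-1)).map PySem.Int.toChars := by
  have hcount : PySem.List.pyRange ((p : Int) + 1 + L) (p : Int) (-1)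
      = (List.range (L + 1)).map (fun k : Nat => (p : Int) + 1 + L + -(k : Int)) := by
    unfold PySem.List.pyRange
    norm_num
    have h : (if (p : Int) < (p : Int) + 1 + L then ((p : Int) + 1 + L).toNat - p else 0)
        = L + 1 := by
      rw [if_pos (by omega)]; omega
    rw [h]
  rw [hcount, List.map_map]
  apply List.ext_getElem
  · simp
  · intro i h1 h2
    simp only [List.length_reverse, List.length_map, List.length_range] at h1
    simp only [List.getElem_reverse, List.getElem_map, List.length_map, List.length_range,
      List.getElem_range, Function.comp_apply]
    congr 1
    push_cast
    omega

-- folding A's step over a run of indices whose pattern chars are all non-'I'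
-- (and which stops short of n+1) only grows the stack
theorem pvRunAcc (cs : List Char) (p : Nat) (j : Nat)
    (hpj : p + j ≤ cs.length)
    (hrun : ∀ k, k < j → ¬ cs[p + k]? = some 'I')
    (st : List (List Char)) (acc : List Char) :
    (PySem.List.pyRange ((p : Int) + 1) ((p : Int) + 1 + j) 1).foldl (pvStepA cs) (st, acc)
      = (st ++ (List.range j).map (fun k : Nat => PySem.Int.toChars ((p : Int) + 1 + k)), acc) := by
  induction j generalizing st with
  | zero => simp
  | succ j ih =>
    have h1 : ((p : Int) + 1 + (↑(j + 1) : Int)) = ((p : Int) + 1 + ↑j) + 1 := by push_cast; ring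
    rw [h1, PySem.List.pyRange_one_succ_right (by omega), List.foldl_append,
      ih (by omega) (fun k hk => hrun k (by omega)) st]
    simp only [List.foldl_cons, List.foldl_nil]
    unfold pvStepA
    have hi : (p : Int) + 1 + (j : Int) - 1 = ((p + j : Nat) : Int) := by push_cast; ring
    have hne : ¬ ((p : Int) + 1 + (j : Int) = (cs.length : Int) + 1) := by omega
    rw [hi, PySem.List.pyGet?_natCast]
    simp [hne, hrun j (by omega), List.range_succ]

-- characters strictly inside the maximal non-'I' run starting at p are not 'I'
theorem pvRunChars (cs : List Char) (p k : Nat) (hp : p ≤ cs.length)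
    (hk : k < ((cs.drop p).takeWhile (fun c => c ≠ 'I')).length) :
    ¬ cs[p + k]? = some 'I' := by
  have hpre := List.takeWhile_prefix (l := cs.drop p) (fun c => decide (c ≠ 'I'))
  have hlen : ((cs.drop p).takeWhile (fun c => c ≠ 'I')).length ≤ (cs.drop p).length :=
    hpre.length_le
  have hkd : k < (cs.drop p).length := by omega
  have hkc : p + k < cs.length := by simp [List.length_drop] at hkd; omega
  have hmem : ((cs.drop p).takeWhile (fun c => c ≠ 'I'))[k] ∈
      ((cs.drop p).takeWhile (fun c => c ≠ 'I')) := List.getElem_mem hk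
  have hpred := List.mem_takeWhile_imp hmem
  have heqd : ((cs.drop p).takeWhile (fun c => c ≠ 'I'))[k] = (cs.drop p)[k] :=
    hpre.getElem hk
  have heq2 : (cs.drop p)[k] = cs[p + k] := List.getElem_drop
  rw [List.getElem?_eq_getElem hkc]
  simp only [heqd, heq2] at hpred
  simp only [decide_eq_true_eq] at hpred
  simp [hpred]

-- the character just after the maximal non-'I' run (if the run is not final) is 'I'
theorem pvStopChar (cs : List Char) (p : Nat)
    (hlt : ((cs.drop p).takeWhile (fun c => c ≠ 'I')).length < (cs.drop p).length) :
    cs[p + ((cs.drop p).takeWhile (fun c => c ≠ 'I')).length]? = some 'I' := by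
  set t := (cs.drop p).takeWhile (fun c => c ≠ 'I') with ht
  set u := (cs.drop p).dropWhile (fun c => c ≠ 'I') with hu
  have hsplit : t ++ u = cs.drop p := List.takeWhile_append_dropWhile
  have hulen : (cs.drop p).length = t.length + u.length := by
    rw [← hsplit, List.length_append]
  have hune : u ≠ [] := by
    intro h; rw [h] at hulen; simp [List.length_drop] at hulen hlt; omega
  have hheadI : u.head hune = 'I' := by
    have h1 := List.head_dropWhile_not (fun c => decide (c ≠ 'I')) (l := cs.drop p)
      (by rw [← hu]; exact hune)
    simp only [← hu] at h1
    simpa using h1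
  have hget : (cs.drop p)[t.length]? = some 'I' := by
    rw [← hsplit, List.getElem?_append_right (le_refl _), Nat.sub_self,
      List.getElem?_eq_getElem (List.length_pos_iff.mpr hune),
      List.getElem_zero_eq_head (List.length_pos_iff.mpr hune), hheadI]
  rw [← List.getElem?_drop]
  exact hget

-- the fold over one whole segment (run + flush index) empties the stack and
-- appends exactly B's descending block
theorem pvFlushFold (cs : List Char) (p L : Nat) (acc : List Char)
    (hpL : p + L ≤ cs.length)
    (hrun : ∀ k, k < L → ¬ cs[p + k]? = some 'I')
    (hstop : ((p + L : Nat) = cs.length) ∨ cs[p + L]? = some 'I') :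
    (PySem.List.pyRange ((p : Int) + 1) ((p : Int) + L + 2) 1).foldl (pvStepA cs) ([], acc)
      = ([], acc ++
          ((PySem.List.pyRange ((p : Int) + 1 + L) (p : Int) (-1)).map PySem.Int.toChars).flatten) := by
  have hb : ((p : Int) + L + 2) = ((p : Int) + 1 + L) + 1 := by ring
  rw [hb, PySem.List.pyRange_one_succ_right (by omega), List.foldl_append,
    pvRunAcc cs p L hpL hrun [] acc]
  simp only [List.foldl_cons, List.foldl_nil, List.nil_append]
  unfold pvStepA
  have hi : (p : Int) + 1 + (L : Int) - 1 = ((p + L : Nat) : Int) := by push_cast; ring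
  have hcond : ((p : Int) + 1 + L = (cs.length : Int) + 1) ∨
      PySem.List.pyGet? cs ((p : Int) + 1 + L - 1) = some 'I' := by
    rcases hstop with h | h
    · left; omega
    · right; rw [hi, PySem.List.pyGet?_natCast]; exact h
  rw [if_pos hcond]
  have hstack : (List.range L).map (fun k : Nat => PySem.Int.toChars ((p : Int) + 1 + k))
      ++ [PySem.Int.toChars ((p : Int) + 1 + L)]
      = (List.range (L + 1)).map (fun k : Nat => PySem.Int.toChars ((p : Int) + 1 + k)) := by
    rw [List.range_succ, List.map_append]; simp
  simp only [hstack, pvRevRange p L]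

-- main invariant: from position p with the stack just flushed, A's remaining fold
-- produces exactly B's output for the remaining pattern
theorem pvMain (cs : List Char) (d : Nat) : ∀ (p : Nat) (acc : List Char),
    p ≤ cs.length → cs.length - p ≤ d →
    ((PySem.List.pyRange ((p : Int) + 1) ((cs.length : Int) + 2) 1).foldl (pvStepA cs) ([], acc)).2
      = acc ++ pvAltGo (cs.drop p) ((p : Int) + 1) := by
  induction d with
  | zero =>
    intro p acc hp hd
    have hpe : p = cs.length := by omega
    subst hpe
    have hdrop : cs.drop cs.length = [] := by simp
    have hf := pvFlushFold cs cs.length 0 acc (by omega)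
      (fun k hk => absurd hk (Nat.not_lt_zero k)) (Or.inl (by omega))
    rw [hdrop, pvAltGo_final [] ((cs.length : Int) + 1) rfl]
    norm_num at hf ⊢
    rw [hf]
  | succ d ih =>
    intro p acc hp hd
    set L := ((cs.drop p).takeWhile (fun c => c ≠ 'I')).length with hLdef
    have hdl : (cs.drop p).length = cs.length - p := List.length_drop
    have hLle : L ≤ (cs.drop p).length :=
      (List.takeWhile_prefix (l := cs.drop p) (fun c => decide (c ≠ 'I'))).length_le
    have hrun : ∀ k, k < L → ¬ cs[p + k]? = some 'I' := fun k hk => pvRunChars cs p k hp hk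
    by_cases hfin : L = (cs.drop p).length
    · have hple : p + L = cs.length := by omega
      have hf := pvFlushFold cs p L acc (by omega) hrun (Or.inl hple)
      have hb : ((cs.length : Int) + 2) = ((p : Int) + L + 2) := by omega
      rw [hb, hf, pvAltGo_final (cs.drop p) ((p : Int) + 1) hfin, ← hLdef]
      norm_num
    · have hlt : L < (cs.drop p).length := lt_of_le_of_ne hLle hfin
      have hstop := pvStopChar cs p hlt
      have hf := pvFlushFold cs p L acc (by omega) hrun (Or.inr hstop)
      have hsplit : PySem.List.pyRange ((p : Int) + 1) ((cs.length : Int) + 2) 1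
          = PySem.List.pyRange ((p : Int) + 1) ((p : Int) + L + 2) 1
            ++ PySem.List.pyRange ((p : Int) + L + 2) ((cs.length : Int) + 2) 1 :=
        PySem.List.pyRange_one_append _ _ _ (by omega) (by omega)
      rw [hsplit, List.foldl_append, hf]
      have harg : ((p : Int) + L + 2) = ((((p + L + 1 : Nat)) : Int) + 1) := by push_cast; ring
      rw [harg, ih (p + L + 1) _ (by omega) (by omega)]
      rw [pvAltGo_step (cs.drop p) ((p : Int) + 1) hfin]
      rw [← hLdef]
      have hdd : (cs.drop p).drop (L + 1) = cs.drop (p + L + 1) := by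
        rw [List.drop_drop, ← Nat.add_assoc]
      have hstart : ((p : Int) + 1) + L + 1 = (((p + L + 1 : Nat) : Int)) + 1 := by
        push_cast; ring
      rw [hdd, hstart]
      norm_num [List.append_assoc]

-- ===== VERDICT (by name: the statement is the Claim_ definition above) =====
theorem smallestNumber_spec : Claim_equal_smallestNumber := by
  intro pattern _
  unfold Spec_smallestNumber smallestNumber smallestNumber_alt
  have h := pvMain pattern.toList pattern.toList.length 0 [] (by omega) (by omega)
  simp only [Int.natCast_zero, zero_add, List.drop_zero] at h
  exact congrArg String.mk h
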